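-- pv_equiv track=rewrite | github.com/cov-lineages/quokka | quokka/extract_lineage_consensus.py | filterMutations
-- ===== SOURCE A (Python) =====
-- def filterMutations(mutations):
--     #Examined positions
--     p = list()
--     #Mutations to keep
--     mL = list()
--
--     #Iterate through the mutations, check if their position is already in p, if so the position
--     #mutates later in the path so the earlier mutation is excluded. If the position is not already
--     #present, add to mL
--     for m in mutations[::-1]:
--         if m[1:-1] not in p:
--             mL.append(m)
--         p.append(m[1:-1])
--
--     return(mL[::-1])
-- ===== SOURCE B (Python) =====
-- def filterMutations(mutations):
--     # Keep each mutation whose position does not occur among the later mutations: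
--     # one forward pass over the list with a suffix membership test, no reversal
--     # and no accumulated seen-list.
--     positions = [m[1:-1] for m in mutations]
--     return [m for i, m in enumerate(mutations) if positions[i] not in positions[i + 1:]]
-- ===== Notes on version B (the rewrite author's own statement) =====
-- stated objective: simpler
-- what changed: Replaces A's reversed scan with a growing seen-positions list and two list reversals by a single forward pass that keeps a mutation iff its position does not occur among the later mutations.
import Mathlib
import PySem

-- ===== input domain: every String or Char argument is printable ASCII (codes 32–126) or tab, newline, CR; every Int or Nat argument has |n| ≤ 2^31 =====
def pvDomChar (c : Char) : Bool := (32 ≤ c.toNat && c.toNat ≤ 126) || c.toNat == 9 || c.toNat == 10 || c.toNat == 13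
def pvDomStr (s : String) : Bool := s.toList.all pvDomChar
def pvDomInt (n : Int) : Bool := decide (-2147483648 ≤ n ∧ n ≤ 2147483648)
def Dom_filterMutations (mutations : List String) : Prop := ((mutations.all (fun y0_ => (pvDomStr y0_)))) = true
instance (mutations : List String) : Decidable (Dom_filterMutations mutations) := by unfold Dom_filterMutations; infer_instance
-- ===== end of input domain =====

-- B replaces A's reversed scan + seen-list + double reversal by one forward pass that keeps
-- a mutation iff its position does not occur in the remaining suffix (objective: simpler).

-- ===== PORT A =====
-- m[1:-1] (the position part of a mutation string)
def pvKey (m : String) : String := PySem.Str.slice m (some 1) (some (-1))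

-- A's loop over mutations[::-1] with state (p, mL); mutations[::-1] is List.reverse
-- (PySem.List.slice?_none_none_neg_one).
def pvALoop : List String → List String → List String → List String × List String
  | [], p, mL => (p, mL)
  | m :: rest, p, mL =>
      pvALoop rest (p ++ [pvKey m]) (if p.contains (pvKey m) then mL else mL ++ [m])

def filterMutations (mutations : List String) : List String :=
  ((pvALoop mutations.reverse [] []).2).reverse

-- ===== PORT B =====
-- forward pass over mutations with their precomputed positions in parallel:
-- keep m iff its position does not occur among the later mutations' positions
def pvAltGo : List String → List String → List String
  | m :: rest, pos :: posRest =>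
      if posRest.contains pos then pvAltGo rest posRest
      else m :: pvAltGo rest posRest
  | _, _ => []

def filterMutations_alt (mutations : List String) : List String :=
  pvAltGo mutations (mutations.map pvKey)

-- ===== PRECONDITION & SPEC =====
def Spec_filterMutations (mutations : List String) (out : List String) : Prop := out = filterMutations_alt mutations
instance (mutations : List String) (out : List String) : Decidable (Spec_filterMutations mutations out) := by unfold Spec_filterMutations; infer_instance

-- ===== CLAIM (what is proved, stated in full; the proofs are below) =====
def Claim_equal_filterMutations : Prop := ∀ (mutations : List String), Dom_filterMutations mutations → Spec_filterMutations mutations (filterMutations mutations)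

-- ===== LEMMAS AND PROOFS =====

-- proof helper: B's filter generalized with an extra set `p` of forbidden positions
def pvBF : List String → List String → List String
  | [], _ => []
  | m :: rest, p =>
      if (rest.map pvKey).contains (pvKey m) || p.contains (pvKey m) then pvBF rest p
      else m :: pvBF rest p

theorem pvBF_append (xs : List String) (m : String) (p : List String) :
    pvBF (xs ++ [m]) p =
      pvBF xs (p ++ [pvKey m]) ++ (if p.contains (pvKey m) then [] else [m]) := by
  induction xs generalizing p with
  | nil => by_cases h : p.contains (pvKey m) <;> simp [pvBF, h]
  | cons x xs ih =>
    simp only [List.cons_append, pvBF, List.map_append, List.map_cons, List.map_nil,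
      List.contains_append, List.contains_cons, List.contains_nil]
    rw [ih]
    by_cases h1 : (xs.map pvKey).contains (pvKey x) <;>
      by_cases h2 : pvKey m == pvKey x <;>
      by_cases h3 : p.contains (pvKey x) <;>
      simp [h1, h2, h3, BEq.comm] <;> split <;> simp

theorem pvALoop_eq (l : List String) (p mL : List String) :
    ((pvALoop l p mL).2).reverse = pvBF l.reverse p ++ mL.reverse := by
  induction l generalizing p mL with
  | nil => simp [pvALoop, pvBF]
  | cons m rest ih =>
    simp only [pvALoop, List.reverse_cons]
    rw [ih, pvBF_append]
    split <;> simp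

theorem pvBF_nil (l : List String) : pvBF l [] = filterMutations_alt l := by
  unfold filterMutations_alt
  induction l with
  | nil => rfl
  | cons m rest ih => simp [pvBF, pvAltGo, List.map_cons, ih, filterMutations_alt]

-- ===== VERDICT (by name: the statement is the Claim_ definition above) =====
theorem filterMutations_spec : Claim_equal_filterMutations := by
  intro mutations _
  show filterMutations mutations = filterMutations_alt mutations
  rw [filterMutations, pvALoop_eq, pvBF_nil]
  simp
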